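-- pv_equiv track=rewrite | github.com/imxiaoxiaohh/master_thesis_project | Evaluation/utils.py | spacing
-- ===== SOURCE A (Python) =====
-- def spacing(text):
--     result = []
--     for i, char in enumerate(text):
--         if char == "\\":
--             if i == 0 or text[i-1] != " ":
--                 result.append(" \\")
--             else:
--                 result.append("\\")
--         else:
--             result.append(char)
--     return ''.join(result)
-- ===== SOURCE B (Python) =====
-- def spacing(text):
--     # Split on the backslash separator and rejoin: a backslash keeps its
--     # form only when the piece before it ends in a space (an empty piece
--     # means start-of-string or a preceding backslash, so a space is added).
--     parts = text.split('\\')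
--     return parts[0] + ''.join(
--         ('\\' if prev.endswith(' ') else ' \\') + nxt
--         for prev, nxt in zip(parts, parts[1:]))
-- ===== Notes on version B (the rewrite author's own statement) =====
-- stated objective: faster
-- what changed: Replaces the per-character enumerate loop with index lookbacks by a split on the backslash separator followed by a rejoin whose separator form depends only on whether the preceding piece ends in a space.
import Mathlib
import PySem

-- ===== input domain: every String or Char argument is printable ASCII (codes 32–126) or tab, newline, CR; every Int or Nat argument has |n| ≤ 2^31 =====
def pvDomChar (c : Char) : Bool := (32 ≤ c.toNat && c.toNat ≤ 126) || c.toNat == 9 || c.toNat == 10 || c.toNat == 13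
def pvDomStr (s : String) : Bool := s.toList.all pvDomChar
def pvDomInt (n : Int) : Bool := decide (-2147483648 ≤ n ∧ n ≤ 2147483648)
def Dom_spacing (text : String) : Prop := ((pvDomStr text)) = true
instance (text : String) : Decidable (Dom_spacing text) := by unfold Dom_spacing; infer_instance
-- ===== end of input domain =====

-- B replaces A's per-character scan with index lookback by split-on-backslash + rejoin (same O(n); measurably faster in CPython via bulk split/join).

-- ===== PORT A =====
-- literal port of A: enumerate, append " \", "\" or the char, join at the end
def spacing (text : String) : String :=
  String.join
    ((PySem.List.enumerate text.toList).foldl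
      (fun result ic =>
        if ic.2 = '\\' then
          if ic.1 = 0 ∨ PySem.List.pyGet? text.toList (ic.1 - 1) ≠ some ' ' then
            result ++ [" \\"]
          else
            result ++ ["\\"]
      else
          result ++ [String.ofList [ic.2]])
      [])

-- ===== PORT B =====
-- literal port of Source B: split on '\', rejoin parts[0] + Σ (sep-choice by endswith ' ') ++ next
def spacing_alt (text : String) : String :=
  match PySem.Chars.splitOn text.toList ['\\'] with
  | [] => ""  -- unreachable: str.split always returns at least one piece
  | p0 :: rest =>
      String.ofList (p0 ++
        (((p0 :: rest).zip rest).map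
          (fun pr =>
            (if PySem.Chars.endswith pr.1 [' '] then ['\\'] else [' ', '\\']) ++ pr.2)).flatten)

-- ===== PRECONDITION & SPEC =====
def Spec_spacing (text : String) (out : String) : Prop := out = spacing_alt text
instance (text : String) (out : String) : Decidable (Spec_spacing text out) := by unfold Spec_spacing; infer_instance

-- ===== CLAIM (what is proved, stated in full; the proofs are below) =====
def Claim_equal_spacing : Prop := ∀ (text : String), Dom_spacing text → Spec_spacing text (spacing text)

-- ===== LEMMAS AND PROOFS =====

-- reference one-pass form: previous char + rest of the string
def gC (p : Char) : List Char → List Char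
  | [] => []
  | c :: t => if c = '\\' then (if p = ' ' then ['\\'] else [' ', '\\']) ++ gC '\\' t
              else c :: gC c t

-- split on '\' as (first piece, later pieces)
def ms : List Char → List Char × List (List Char)
  | [] => ([], [])
  | c :: t => if c = '\\' then ([], (ms t).1 :: (ms t).2)
              else (c :: (ms t).1, (ms t).2)

-- rejoin of the later pieces, given the previous char before each separator
def jp (pr : Char) : List (List Char) → List Char
  | [] => []
  | q :: qs => (if pr = ' ' then ['\\'] else [' ', '\\']) ++ q ++ jp (q.getLastD '\\') qs

-- A's per-index piece equals the (predecessor, char) piece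
theorem spacing_maps_eq (l : List Char) :
    (PySem.List.enumerate l).map
      (fun ic =>
        if ic.2 = '\\' then
          if ic.1 = 0 ∨ PySem.List.pyGet? l (ic.1 - 1) ≠ some ' ' then " \\" else "\\"
        else String.ofList [ic.2])
    = (('x' :: l).zip l).map
      (fun pc =>
        if pc.2 = '\\' then (if pc.1 = ' ' then "\\" else " \\")
        else String.ofList [pc.2]) := by
  apply List.ext_getElem
  · simp [PySem.List.length_enumerate]
  · intro k h1 h2
    simp only [List.getElem_map, PySem.List.getElem_enumerate, List.getElem_zip]
    have hk : k < l.length := by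
      have := h1; simpa [PySem.List.length_enumerate] using this
    cases k with
    | zero => simp
    | succ j =>
        have hj : j < l.length := Nat.lt_of_succ_lt hk
        have hidx : ((0 : Int) + (j + 1 : Nat)) - 1 = ((j : Nat) : Int) := by push_cast; ring
        have hget : PySem.List.pyGet? l (((0 : Int) + (j + 1 : Nat)) - 1) = some l[j] := by
          rw [hidx, PySem.List.pyGet?_natCast]
          simp [List.getElem?_eq_getElem hj]
        have hne : ((0 : Int) + (j + 1 : Nat)) ≠ 0 := by push_cast; omega
        simp only [hne, hget, false_or]
        have hprev : ('x' :: l)[j + 1]'(by simpa using Nat.succ_lt_succ hj) = l[j] := by simp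
        rw [hprev]
        by_cases hc : l[Nat.succ j]'hk = '\\'
        · simp only [hc]
          by_cases hs : l[j] = ' ' <;> simp [hs]
        · simp [hc]

-- the zip form of A computes gC
theorem zip_eq_gC (l : List Char) (p : Char) :
    ((((p :: l).zip l).map
      (fun pc =>
        if pc.2 = '\\' then (if pc.1 = ' ' then "\\" else " \\")
        else String.ofList [pc.2])).map String.toList).flatten = gC p l := by
  induction l generalizing p with
  | nil => simp [gC]
  | cons c t ih =>
      rw [show ((p :: c :: t).zip (c :: t)) = (p, c) :: ((c :: t).zip t) from rfl]
      rw [List.map_cons, List.map_cons, List.flatten_cons, ih c]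
      by_cases hc : c = '\\'
      · subst hc
        by_cases hp : p = ' ' <;> simp [gC, hp]
      · simp [gC, hc]

-- A = gC 'x'
theorem spacing_eq_gC (text : String) :
    (spacing text).toList = gC 'x' text.toList := by
  unfold spacing
  rw [show (fun (result : List String) (ic : Int × Char) =>
        if ic.2 = '\\' then
          if ic.1 = 0 ∨ PySem.List.pyGet? text.toList (ic.1 - 1) ≠ some ' ' then
            result ++ [" \\"]
          else result ++ ["\\"]
        else result ++ [String.ofList [ic.2]])
      = (fun (result : List String) (ic : Int × Char) => result ++
          [if ic.2 = '\\' then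
            if ic.1 = 0 ∨ PySem.List.pyGet? text.toList (ic.1 - 1) ≠ some ' ' then " \\" else "\\"
           else String.ofList [ic.2]]) from by
        funext result ic; by_cases h1 : ic.2 = '\\' <;> simp [h1]; split <;> rfl]
  rw [PySem.List.foldl_append_singleton_eq_map, List.nil_append, spacing_maps_eq,
      show ∀ L : List String, (String.join L).toList = (L.map String.toList).flatten from
        fun L => by simp,
      zip_eq_gC]

-- PySem's fuel-based splitOn for the one-char separator '\' is ms
theorem go_eq_ms (fuel : Nat) (l cur : List Char) (acc : List (List Char))
    (h : l.length < fuel) :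
    PySem.Chars.splitOn.go ['\\'] fuel l cur acc
      = acc.reverse ++ (cur.reverse ++ (ms l).1) :: (ms l).2 := by
  induction fuel generalizing l cur acc with
  | zero => omega
  | succ fuel ih =>
      cases l with
      | nil => simp [PySem.Chars.splitOn.go, ms]
      | cons c rest =>
          by_cases hc : c = '\\'
          · subst hc
            rw [show PySem.Chars.splitOn.go ['\\'] (fuel+1) ('\\' :: rest) cur acc
                  = PySem.Chars.splitOn.go ['\\'] fuel rest [] (cur.reverse :: acc) from by
                simp [PySem.Chars.splitOn.go, List.isPrefixOf]]
            rw [ih rest [] (cur.reverse :: acc) (by simpa using Nat.lt_of_succ_lt_succ h)]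
            simp [ms]
          · rw [show PySem.Chars.splitOn.go ['\\'] (fuel+1) (c :: rest) cur acc
                  = PySem.Chars.splitOn.go ['\\'] fuel rest (c :: cur) acc from by
                simp only [PySem.Chars.splitOn.go, List.isPrefixOf]
                rw [if_neg (by simp [Ne.symm hc])]]
            rw [ih rest (c :: cur) acc (by simpa using Nat.lt_of_succ_lt_succ h)]
            simp [ms, hc]

theorem splitOn_eq_ms (l : List Char) :
    PySem.Chars.splitOn l ['\\'] = (ms l).1 :: (ms l).2 := by
  unfold PySem.Chars.splitOn
  rw [go_eq_ms l.length.succ l [] [] (Nat.lt_succ_self _)]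
  simp

-- endswith " " decided by getLastD with a non-space default
theorem endswith_space (s : List Char) (d : Char) (hd : d ≠ ' ') :
    PySem.Chars.endswith s [' '] = (s.getLastD d == ' ') := by
  rw [List.getLastD_eq_getLast?]
  cases hl : s.getLast? with
  | none =>
      have hs : s = [] := List.getLast?_eq_none_iff.mp hl
      subst hs
      have hf : PySem.Chars.endswith ([] : List Char) [' '] = false := by
        rw [Bool.eq_false_iff]
        intro h
        obtain ⟨t, ht⟩ := (PySem.Chars.endswith_iff _ _).mp h
        simp at ht
      simp [hf, hd]
  | some a =>
      obtain ⟨ys, rfl⟩ := List.getLast?_eq_some_iff.mp hl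
      by_cases ha : a = ' '
      · subst ha
        simp [(PySem.Chars.endswith_iff _ _).mpr ⟨ys, rfl⟩]
      · have hf : PySem.Chars.endswith (ys ++ [a]) [' '] = false := by
          rw [Bool.eq_false_iff]
          intro h
          obtain ⟨t, ht⟩ := (PySem.Chars.endswith_iff _ _).mp h
          have : a = ' ' := by
            have h1 : (ys ++ [a]).getLast? = some a := by simp
            rw [← ht] at h1
            simpa using h1.symm
          exact ha this
        simp [hf, ha]

-- B's zip-map-flatten rejoin is jp
theorem zipB_eq_jp (qs : List (List Char)) (prev : List Char) (d : Char) (hd : d ≠ ' ') :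
    (((prev :: qs).zip qs).map
      (fun pr =>
        (if PySem.Chars.endswith pr.1 [' '] then ['\\'] else [' ', '\\']) ++ pr.2)).flatten
      = jp (prev.getLastD d) qs := by
  induction qs generalizing prev d with
  | nil => simp [jp]
  | cons q qs ih =>
      rw [show ((prev :: q :: qs).zip (q :: qs)) = (prev, q) :: ((q :: qs).zip qs) from rfl]
      rw [List.map_cons, List.flatten_cons, ih q '\\' (by decide), jp]
      rw [endswith_space prev d hd]
      simp

-- gC is the split-rejoin
theorem gC_eq_split (l : List Char) (p : Char) :
    gC p l = (ms l).1 ++ jp ((ms l).1.getLastD p) (ms l).2 := by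
  induction l generalizing p with
  | nil => simp [gC, ms, jp]
  | cons c t ih =>
      by_cases hc : c = '\\'
      · subst hc
        simp only [gC, ms]
        rw [ih '\\']
        simp [jp]
      · simp only [gC, ms, if_neg hc]
        rw [ih c]
        cases hms : (ms t).1 <;> simp [List.getLastD]

-- ===== VERDICT (by name: the statement is the Claim_ definition above) =====
theorem spacing_spec : Claim_equal_spacing := by
  intro text _
  unfold Spec_spacing spacing_alt
  rw [splitOn_eq_ms]
  apply String.toList_inj.mp
  rw [spacing_eq_gC, gC_eq_split text.toList 'x']
  simp only [String.toList_ofList]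
  rw [zipB_eq_jp (ms text.toList).2 (ms text.toList).1 'x' (by decide)]
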